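-- pv_equiv track=rewrite | github.com/kiapelyn/Atvs_ED | atv1/Ex01.py | verifica_soma
-- ===== SOURCE A (Python) =====
-- def verifica_soma(array):
--     existe = False
--
--     for i in range(len(array)):
--         somas = []
--         if i == 0 or i == 1:
--             continue
--         else:
--             for j in range(i):
--                 for k in range(j+1, i):
--                     somas.append(array[j] + array[k])
--
--         if array[i] in somas:
--             existe = True
--             break
--
--     return existe
-- ===== SOURCE B (Python) =====
-- def verifica_soma(array):
--     sums = set()
--     prefix = []
--     for x in array:
--         if x in sums:
--             return True
--         for p in prefix:
--             sums.add(p + x)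
--         prefix.append(x)
--     return False
-- ===== Notes on version B (the rewrite author's own statement) =====
-- stated objective: faster
-- what changed: Replaces the O(n^3) rebuild of all earlier pair-sums at every index by a single pass that incrementally maintains a set of pair-sums of the prefix and tests membership per element.
import Mathlib
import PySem

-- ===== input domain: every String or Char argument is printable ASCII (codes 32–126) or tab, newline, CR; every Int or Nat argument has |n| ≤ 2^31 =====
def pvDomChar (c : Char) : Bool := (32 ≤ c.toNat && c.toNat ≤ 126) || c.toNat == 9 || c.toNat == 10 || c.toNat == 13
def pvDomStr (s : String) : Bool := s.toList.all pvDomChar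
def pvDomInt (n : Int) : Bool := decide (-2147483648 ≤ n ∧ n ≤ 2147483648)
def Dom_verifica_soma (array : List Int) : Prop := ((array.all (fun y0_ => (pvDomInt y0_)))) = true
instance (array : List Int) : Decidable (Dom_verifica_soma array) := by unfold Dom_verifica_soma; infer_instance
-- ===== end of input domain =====

-- B replaces A's per-index O(n^2) rebuild of all earlier pair-sums by one pass maintaining a set
-- of pref pair-sums (objective: faster, O(n^2) vs O(n^3)).

-- ===== PORT A =====
-- somas for a given i: for j in range(i): for k in range(j+1, i): somas.append(array[j]+array[k])
-- array.getD j 0 is exact here: every index produced by the ranges is < array.length.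
def pvA_somas (array : List Int) (i : Nat) : List Int :=
  (List.range i).foldl (fun acc j =>
    (List.range' (j+1) (i - (j+1))).foldl (fun acc2 k =>
      acc2 ++ [array.getD j 0 + array.getD k 0]) acc) []

def pvA_go (array : List Int) : List Nat → Bool
  | [] => false
  | i :: rest =>
    if i = 0 ∨ i = 1 then pvA_go array rest
    else
      let somas := pvA_somas array i
      if somas.contains (array.getD i 0) then true
      else pvA_go array rest

def verifica_soma (array : List Int) : Bool :=
  pvA_go array (List.range array.length)

-- ===== PORT B =====
def pvB_go (sums : PySem.Set Int) (pref : List Int) : List Int → Bool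
  | [] => false
  | x :: rest =>
    if PySem.Set.contains sums x then true
    else pvB_go (pref.foldl (fun s p => PySem.Set.add s (p + x)) sums) (pref ++ [x]) rest

def verifica_soma_alt (array : List Int) : Bool :=
  pvB_go PySem.Set.empty [] array

-- ===== PRECONDITION & SPEC =====
def Spec_verifica_soma (array : List Int) (out : Bool) : Prop := out = verifica_soma_alt array
instance (array : List Int) (out : Bool) : Decidable (Spec_verifica_soma array out) := by unfold Spec_verifica_soma; infer_instance

-- ===== CLAIM (what is proved, stated in full; the proofs are below) =====
def Claim_equal_verifica_soma : Prop := ∀ (array : List Int), Dom_verifica_soma array → Spec_verifica_soma array (verifica_soma array)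

-- ===== LEMMAS AND PROOFS =====

-- common characterization: some element equals the sum of two distinct earlier elements
def pvP (array : List Int) : Prop :=
  ∃ i, i < array.length ∧ ∃ j k, j < k ∧ k < i ∧
    array.getD j 0 + array.getD k 0 = array.getD i 0

theorem pvFoldlApp {α β : Type} (g : α → List β) (l : List α) : ∀ (init : List β),
    l.foldl (fun acc j => acc ++ g j) init = init ++ l.flatMap g := by
  induction l with
  | nil => simp
  | cons a t ih => intro init; simp [List.foldl_cons, ih]

theorem pvGetDAppLeft (l m : List Int) (j : Nat) (h : j < l.length) (d : Int) :
    (l ++ m).getD j d = l.getD j d := by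
  induction l generalizing j with
  | nil => simp at h
  | cons a t ih =>
    cases j with
    | zero => simp
    | succ j' => simp only [List.cons_append, List.getD_cons_succ]; exact ih j' (by simpa using h)

theorem pvGetDAppSelf (l m : List Int) (x d : Int) :
    (l ++ x :: m).getD l.length d = x := by
  induction l with
  | nil => simp
  | cons a t _ => simp

theorem pvFlattenSingle {α β : Type} (f : α → β) (l : List α) :
    (l.map (fun x => [f x])).flatten = l.map f := by
  induction l <;> simp_all

theorem pvA_somas_mem (array : List Int) (i : Nat) (x : Int) :
    x ∈ pvA_somas array i ↔ ∃ j k, j < k ∧ k < i ∧ array.getD j 0 + array.getD k 0 = x := by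
  unfold pvA_somas
  have hin : ∀ (acc : List Int) (j : Nat),
      (List.range' (j+1) (i-(j+1))).foldl
          (fun acc2 k => acc2 ++ [array.getD j 0 + array.getD k 0]) acc
        = acc ++ (List.range' (j+1) (i-(j+1))).map (fun k => array.getD j 0 + array.getD k 0) := by
    intro acc j
    rw [show (fun acc2 k => acc2 ++ [array.getD j 0 + array.getD k 0])
          = (fun acc2 k => acc2 ++ (fun k => [array.getD j 0 + array.getD k 0]) k) from rfl,
        pvFoldlApp]
    simp [List.flatMap_def, pvFlattenSingle]
  simp only [hin]
  rw [pvFoldlApp]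
  simp only [List.nil_append, List.mem_flatMap, List.mem_map, List.mem_range, List.mem_range'_1]
  constructor
  · rintro ⟨j, hj, ⟨k, ⟨hk1, hk2⟩, rfl⟩⟩
    exact ⟨j, k, by omega, by omega, rfl⟩
  · rintro ⟨j, k, h1, h2, rfl⟩
    exact ⟨j, by omega, ⟨k, ⟨by omega, by omega⟩, rfl⟩⟩

theorem pvA_go_iff (array : List Int) (is : List Nat) :
    pvA_go array is = true ↔ ∃ i ∈ is, ∃ j k, j < k ∧ k < i ∧
      array.getD j 0 + array.getD k 0 = array.getD i 0 := by
  induction is with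
  | nil => simp [pvA_go]
  | cons i rest ih =>
    by_cases h0 : i = 0 ∨ i = 1
    · rw [show pvA_go array (i :: rest) = pvA_go array rest from by simp [pvA_go, h0], ih]
      simp only [List.mem_cons]
      constructor
      · rintro ⟨i', hi', hjk⟩; exact ⟨i', Or.inr hi', hjk⟩
      · rintro ⟨i', hi', hjk⟩
        rcases hi' with rfl | h
        · exfalso; obtain ⟨j, k, h1, h2, _⟩ := hjk; rcases h0 with rfl | rfl <;> omega
        · exact ⟨i', h, hjk⟩
    · by_cases hc : array.getD i 0 ∈ pvA_somas array i
      · have hgo : pvA_go array (i :: rest) = true := by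
          simp only [pvA_go, List.contains_eq_mem, decide_eq_true_iff]
          rw [if_neg h0, if_pos hc]
        rw [hgo]
        simp only [List.mem_cons, true_iff]
        obtain ⟨j, k, h1, h2, h3⟩ := (pvA_somas_mem array i _).1 hc
        exact ⟨i, Or.inl rfl, j, k, h1, h2, h3⟩
      · rw [show pvA_go array (i :: rest) = pvA_go array rest from by
            simp only [pvA_go, List.contains_eq_mem, decide_eq_true_iff]
            rw [if_neg h0, if_neg hc], ih]
        constructor
        · rintro ⟨i', h, hjk⟩; exact ⟨i', List.mem_cons_of_mem _ h, hjk⟩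
        · rintro ⟨i', hi', hjk⟩
          rcases List.mem_cons.1 hi' with rfl | h
          · exact absurd ((pvA_somas_mem array i' _).2 hjk) hc
          · exact ⟨i', h, hjk⟩

theorem verifica_soma_iff (array : List Int) : verifica_soma array = true ↔ pvP array := by
  unfold verifica_soma pvP
  rw [pvA_go_iff]
  simp [List.mem_range]

theorem pvB_foldl_mem (l : List Int) (f : Int → Int) (y : Int) : ∀ (s : PySem.Set Int),
    (y ∈ l.foldl (fun s p => PySem.Set.add s (f p)) s ↔ y ∈ s ∨ ∃ p ∈ l, y = f p) := by
  induction l with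
  | nil => simp
  | cons a t ih =>
    intro s
    simp only [List.foldl_cons, ih, PySem.Set.mem_add, List.mem_cons]
    constructor
    · rintro ((hs | rfl) | ⟨p, hp, rfl⟩)
      · exact Or.inl hs
      · exact Or.inr ⟨a, Or.inl rfl, rfl⟩
      · exact Or.inr ⟨p, Or.inr hp, rfl⟩
    · rintro (hs | ⟨p, rfl | hp, rfl⟩)
      · exact Or.inl (Or.inl hs)
      · exact Or.inl (Or.inr rfl)
      · exact Or.inr ⟨p, hp, rfl⟩

theorem pvMemIffGetD (l : List Int) (p : Int) :
    p ∈ l ↔ ∃ j, j < l.length ∧ l.getD j 0 = p := by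
  constructor
  · intro h
    obtain ⟨j, hj, rfl⟩ := List.mem_iff_getElem.1 h
    exact ⟨j, hj, by simp [List.getD_eq_getElem?_getD, List.getElem?_eq_getElem hj]⟩
  · rintro ⟨j, hj, rfl⟩
    rw [List.getD_eq_getElem?_getD, List.getElem?_eq_getElem hj]
    exact List.getElem_mem hj

theorem pvB_go_iff (rest : List Int) : ∀ (pref : List Int) (sums : PySem.Set Int),
    (∀ y, y ∈ sums ↔ ∃ j k, j < k ∧ k < pref.length ∧
        pref.getD j 0 + pref.getD k 0 = y) →
    (pvB_go sums pref rest = true ↔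
      ∃ i, pref.length ≤ i ∧ i < (pref ++ rest).length ∧ ∃ j k, j < k ∧ k < i ∧
        (pref ++ rest).getD j 0 + (pref ++ rest).getD k 0 = (pref ++ rest).getD i 0) := by
  induction rest with
  | nil =>
    intro pref sums _
    simp only [pvB_go, List.append_nil]
    constructor
    · intro h; cases h
    · rintro ⟨i, h1, h2, _⟩; omega
  | cons x rest' ih =>
    intro pref sums hinv
    have hgetx : (pref ++ x :: rest').getD pref.length 0 = x := pvGetDAppSelf pref rest' x 0
    by_cases hc : x ∈ sums
    · have : pvB_go sums pref (x :: rest') = true := by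
        simp [pvB_go, hc]
      rw [this]
      simp only [true_iff]
      obtain ⟨j, k, h1, h2, h3⟩ := (hinv x).1 hc
      refine ⟨pref.length, le_refl _, by simp, j, k, h1, h2, ?_⟩
      rw [pvGetDAppLeft pref (x :: rest') j (by omega) 0,
          pvGetDAppLeft pref (x :: rest') k (by omega) 0, hgetx, h3]
    · have hstep : pvB_go sums pref (x :: rest')
          = pvB_go (pref.foldl (fun s p => PySem.Set.add s (p + x)) sums) (pref ++ [x]) rest' := by
        simp [pvB_go, hc]
      rw [hstep]
      have hinv' : ∀ y, y ∈ pref.foldl (fun s p => PySem.Set.add s (p + x)) sums ↔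
          ∃ j k, j < k ∧ k < (pref ++ [x]).length ∧
            (pref ++ [x]).getD j 0 + (pref ++ [x]).getD k 0 = y := by
        intro y
        rw [pvB_foldl_mem, hinv]
        constructor
        · rintro (⟨j, k, h1, h2, rfl⟩ | ⟨p, hp, rfl⟩)
          · exact ⟨j, k, h1, by simp; omega, by
              rw [pvGetDAppLeft pref [x] j (by omega) 0, pvGetDAppLeft pref [x] k (by omega) 0]⟩
          · obtain ⟨j, hj, rfl⟩ := (pvMemIffGetD pref p).1 hp
            refine ⟨j, pref.length, hj, by simp, ?_⟩
            rw [pvGetDAppLeft pref [x] j (by omega) 0,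
                show (pref ++ [x]).getD pref.length 0 = x from pvGetDAppSelf pref [] x 0]
        · rintro ⟨j, k, h1, h2, rfl⟩
          simp only [List.length_append, List.length_cons, List.length_nil] at h2
          by_cases hk : k < pref.length
          · refine Or.inl ⟨j, k, h1, hk, ?_⟩
            rw [pvGetDAppLeft pref [x] j (by omega) 0, pvGetDAppLeft pref [x] k (by omega) 0]
          · have hk' : k = pref.length := by omega
            subst hk'
            refine Or.inr ⟨pref.getD j 0, (pvMemIffGetD pref _).2 ⟨j, by omega, rfl⟩, ?_⟩
            rw [pvGetDAppLeft pref [x] j (by omega) 0,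
                show (pref ++ [x]).getD pref.length 0 = x from pvGetDAppSelf pref [] x 0]
      rw [ih (pref ++ [x]) _ hinv']
      have hlist : (pref ++ [x]) ++ rest' = pref ++ x :: rest' := by simp
      rw [hlist]
      simp only [List.length_append, List.length_cons, List.length_nil]
      constructor
      · rintro ⟨i, h1, h2, hjk⟩; exact ⟨i, by omega, by simpa using h2, hjk⟩
      · rintro ⟨i, h1, h2, j, k, hj, hk, hs⟩
        by_cases hi : pref.length + 1 ≤ i
        · exact ⟨i, hi, by simpa using h2, j, k, hj, hk, hs⟩
        · exfalso
          have hi' : i = pref.length := by omega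
          subst hi'
          apply hc
          rw [hinv x]
          refine ⟨j, k, hj, by omega, ?_⟩
          rw [← pvGetDAppLeft pref (x :: rest') j (by omega) 0,
              ← pvGetDAppLeft pref (x :: rest') k (by omega) 0, hs, hgetx]

theorem verifica_soma_alt_iff (array : List Int) : verifica_soma_alt array = true ↔ pvP array := by
  unfold verifica_soma_alt pvP
  rw [pvB_go_iff array [] PySem.Set.empty (by simp [PySem.Set.empty])]
  simp

-- ===== VERDICT (by name: the statement is the Claim_ definition above) =====
theorem verifica_soma_spec : Claim_equal_verifica_soma := by
  intro array _
  unfold Spec_verifica_soma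
  have h : (verifica_soma array = true) ↔ (verifica_soma_alt array = true) :=
    (verifica_soma_iff array).trans (verifica_soma_alt_iff array).symm
  cases h1 : verifica_soma array <;> cases h2 : verifica_soma_alt array <;> simp_all
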